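-- pv_equiv track=rewrite | github.com/fkgkdfgy/hack_dev_suite | hack_assembler/assembler_parser.py | SegmentInstruction
-- ===== SOURCE A (Python) =====
-- valid_char = ['_','.','$']
--
-- def IsValidChar(char):
--     return str(char).isalpha() or char in valid_char or str(char).isdigit()
--
-- def SegmentInstruction(sentense):
--
--     def inner_segment(sentense,result):
--         if not sentense:
--             return
--         index = 0
--         if sentense[0].isalpha():
--             for i in range(len(sentense)):
--                 if IsValidChar(sentense[i]):
--                     index = i
--                 else:
--                     break
--         elif sentense[0].isdigit():
--             for i in range(len(sentense)):
--                 if sentense[i].isdigit():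
--                     index = i
--                 else:
--                     break
--         result.append(sentense[0:index+1])
--         inner_segment(sentense[index+1:],result)
--
--     result = []
--     inner_segment(sentense,result)
--     return result
-- ===== SOURCE B (Python) =====
-- valid_char = ['_','.','$']
--
-- def SegmentInstruction(sentense):
--     # single left-to-right pass with an index pointer instead of recursive slicing
--     result = []
--     i = 0
--     n = len(sentense)
--     while i < n:
--         c = sentense[i]
--         j = i + 1
--         if c.isalpha():
--             while j < n and (sentense[j].isalpha() or sentense[j].isdigit() or sentense[j] in valid_char):
--                 j += 1
--         elif c.isdigit():
--             while j < n and sentense[j].isdigit():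
--                 j += 1
--         result.append(sentense[i:j])
--         i = j
--     return result
-- ===== Notes on version B (the rewrite author's own statement) =====
-- stated objective: alternative
-- what changed: replaces A's recursion that re-slices the remaining string (and re-scans it with an index-tracking for loop) by one iterative left-to-right pass with two index pointers that extend each token in place
import Mathlib
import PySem

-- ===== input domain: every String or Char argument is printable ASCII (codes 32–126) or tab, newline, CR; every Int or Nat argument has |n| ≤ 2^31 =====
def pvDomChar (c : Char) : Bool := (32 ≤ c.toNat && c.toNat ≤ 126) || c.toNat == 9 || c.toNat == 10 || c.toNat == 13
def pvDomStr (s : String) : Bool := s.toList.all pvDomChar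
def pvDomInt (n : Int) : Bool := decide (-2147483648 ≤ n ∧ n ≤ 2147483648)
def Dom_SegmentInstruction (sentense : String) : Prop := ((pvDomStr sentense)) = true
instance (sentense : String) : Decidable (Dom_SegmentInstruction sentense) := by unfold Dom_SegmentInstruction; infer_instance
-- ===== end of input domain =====

-- B replaces A's recursive re-slicing with an iterative single left-to-right pass splitting each maximal run; proved to return the same token list on all inputs.


-- ===== PORT A =====
-- IsValidChar: alpha or in valid_char or digit
def pvIsValidChar (c : Char) : Bool :=
  PySem.Chars.isalpha c || (c == '_' || c == '.' || c == '$') || PySem.Chars.isdigit c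

-- the `for i in range(len(s)): if pred s[i]: index = i else: break` loop,
-- carrying the running position i and the last stored index
def pvIdxLoopA (pred : Char → Bool) : List Char → Nat → Nat → Nat
  | [], _, index => index
  | c :: rest, i, index => if pred c then pvIdxLoopA pred rest (i + 1) i else index

-- inner_segment: compute index, append s[0:index+1], recurse on s[index+1:]
def pvInnerA : List Char → List String
  | [] => []
  | c :: rest =>
    let s := c :: rest
    let index : Nat :=
      if PySem.Chars.isalpha c then pvIdxLoopA pvIsValidChar s 0 0
      else if PySem.Chars.isdigit c then pvIdxLoopA PySem.Chars.isdigit s 0 0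
      else 0
    String.ofList (s.take (index + 1)) :: pvInnerA (s.drop (index + 1))
termination_by l => l.length
decreasing_by simp [List.length_drop]

def SegmentInstruction (sentense : String) : List String :=
  pvInnerA sentense.toList

-- ===== PORT B =====
-- B's predicate (alpha or digit or in valid_char, B's test order)
def pvIsValidCharB (c : Char) : Bool :=
  PySem.Chars.isalpha c || PySem.Chars.isdigit c || (c == '_' || c == '.' || c == '$')

-- B's inner while loop: extend the run while pred holds; returns (run, remainder)
def pvRunB (pred : Char → Bool) : List Char → List Char × List Char
  | [] => ([], [])
  | c :: rest =>
    if pred c then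
      let p := pvRunB pred rest
      (c :: p.1, p.2)
    else ([], c :: rest)

theorem pvRunB_snd_length_le (pred : Char → Bool) (l : List Char) :
    (pvRunB pred l).2.length ≤ l.length := by
  induction l with
  | nil => simp [pvRunB]
  | cons c rest ih =>
    by_cases h : pred c = true <;> simp [pvRunB, h] <;> omega

-- B's outer while loop: one token per step
def pvTokensB : List Char → List String
  | [] => []
  | c :: rest =>
    let p : List Char × List Char :=
      if PySem.Chars.isalpha c then pvRunB pvIsValidCharB rest
      else if PySem.Chars.isdigit c then pvRunB PySem.Chars.isdigit rest
      else ([], rest)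
    String.ofList (c :: p.1) :: pvTokensB p.2
termination_by l => l.length
decreasing_by
  split_ifs <;> simp <;> first | exact pvRunB_snd_length_le _ _ | skip

def SegmentInstruction_alt (sentense : String) : List String :=
  pvTokensB sentense.toList

-- ===== PRECONDITION & SPEC =====
def Spec_SegmentInstruction (sentense : String) (out : List String) : Prop := out = SegmentInstruction_alt sentense
instance (sentense : String) (out : List String) : Decidable (Spec_SegmentInstruction sentense out) := by unfold Spec_SegmentInstruction; infer_instance

-- ===== CLAIM (what is proved, stated in full; the proofs are below) =====
def Claim_equal_SegmentInstruction : Prop := ∀ (sentense : String), Dom_SegmentInstruction sentense → Spec_SegmentInstruction sentense (SegmentInstruction sentense)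

-- ===== LEMMAS AND PROOFS =====

theorem pvIsValidCharB_eq : pvIsValidCharB = pvIsValidChar := by
  funext c
  simp only [pvIsValidCharB, pvIsValidChar]
  cases PySem.Chars.isalpha c <;> cases PySem.Chars.isdigit c <;>
    cases (c == '_' || c == '.' || c == '$') <;> rfl

theorem pvRunB_eq (pred : Char → Bool) (l : List Char) :
    pvRunB pred l = (l.takeWhile pred, l.dropWhile pred) := by
  induction l with
  | nil => simp [pvRunB]
  | cons c rest ih =>
    by_cases h : pred c = true <;>
      simp [pvRunB, h, ih]

-- A's index loop computes i + (run length) - 1 (or the stored index if the run is empty)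
theorem pvIdxLoopA_eq (pred : Char → Bool) (l : List Char) (i j : Nat) :
    pvIdxLoopA pred l i j =
      if (l.takeWhile pred).length = 0 then j else i + (l.takeWhile pred).length - 1 := by
  induction l generalizing i j with
  | nil => simp [pvIdxLoopA]
  | cons c rest ih =>
    by_cases h : pred c = true
    · simp only [pvIdxLoopA, h, if_true, List.takeWhile_cons, ih]
      by_cases h2 : (rest.takeWhile pred).length = 0 <;> simp [h2] <;> try omega
    · simp [pvIdxLoopA, h]

theorem take_len_takeWhile (pred : Char → Bool) (l : List Char) :
    l.take (l.takeWhile pred).length = l.takeWhile pred := by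
  induction l with
  | nil => simp
  | cons c rest ih =>
    by_cases h : pred c = true <;> simp [h, ih]

theorem drop_len_takeWhile (pred : Char → Bool) (l : List Char) :
    l.drop (l.takeWhile pred).length = l.dropWhile pred := by
  induction l with
  | nil => simp
  | cons c rest ih =>
    by_cases h : pred c = true <;> simp [h, ih]

-- one step of A rewritten through the run-length characterisation, when the head satisfies pred
theorem pvInnerA_step (pred : Char → Bool) (c : Char) (rest : List Char) (hc : pred c = true) :
    ((pvIdxLoopA pred (c :: rest) 0 0) + 1 = ((c :: rest).takeWhile pred).length) := by
  rw [pvIdxLoopA_eq]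
  simp [hc]

theorem pvInnerA_eq_pvTokensB : ∀ (n : Nat) (l : List Char), l.length ≤ n → pvInnerA l = pvTokensB l := by
  intro n
  induction n with
  | zero =>
    intro l hl
    have : l = [] := List.eq_nil_of_length_eq_zero (Nat.le_zero.mp hl)
    simp [this, pvInnerA, pvTokensB]
  | succ n ih =>
    intro l hl
    match l with
    | [] => simp [pvInnerA, pvTokensB]
    | c :: rest =>
      rw [pvInnerA, pvTokensB]
      by_cases ha : PySem.Chars.isalpha c = true
      · have hc : pvIsValidChar c = true := by simp [pvIsValidChar, ha]
        have hidx := pvInnerA_step pvIsValidChar c rest hc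
        simp only [ha, if_true, pvIsValidCharB_eq, pvRunB_eq]
        rw [hidx, take_len_takeWhile, drop_len_takeWhile]
        have htw : (c :: rest).takeWhile pvIsValidChar = c :: rest.takeWhile pvIsValidChar := by
          simp [hc]
        have hdw : (c :: rest).dropWhile pvIsValidChar = rest.dropWhile pvIsValidChar := by
          simp [hc]
        rw [htw, hdw, ih _ (by
          have := List.length_dropWhile_le (p := pvIsValidChar) (l := rest)
          simp at hl ⊢; omega)]
      · by_cases hd : PySem.Chars.isdigit c = true
        · have hidx := pvInnerA_step PySem.Chars.isdigit c rest hd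
          simp only [ha, hd, Bool.false_eq_true, if_false, if_true, pvRunB_eq]
          rw [hidx, take_len_takeWhile, drop_len_takeWhile]
          have htw : (c :: rest).takeWhile PySem.Chars.isdigit = c :: rest.takeWhile PySem.Chars.isdigit := by
            simp [hd]
          have hdw : (c :: rest).dropWhile PySem.Chars.isdigit = rest.dropWhile PySem.Chars.isdigit := by
            simp [hd]
          rw [htw, hdw, ih _ (by
            have := List.length_dropWhile_le (p := PySem.Chars.isdigit) (l := rest)
            simp at hl ⊢; omega)]
        · simp only [ha, hd, Bool.false_eq_true, if_false]
          rw [show List.drop (0 + 1) (c :: rest) = rest from rfl,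
            ih rest (by simp at hl; omega)]
          rfl

-- ===== VERDICT (by name: the statement is the Claim_ definition above) =====
theorem SegmentInstruction_spec : Claim_equal_SegmentInstruction := by
  intro s _
  unfold Spec_SegmentInstruction SegmentInstruction SegmentInstruction_alt
  exact pvInnerA_eq_pvTokensB s.toList.length s.toList le_rfl
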